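-- pv_equiv track=rewrite | github.com/pypi-data/pypi-mirror-275 | packages/number2text/number2text-0.0.1.tar.gz/number2text-0.0.1/number2text/lang/so.py | convert
-- ===== SOURCE A (Python) =====
-- _ones = ['', 'kow', 'labo', 'saddex', 'afar', 'shan', 'lix', 'toddoba', 'siddeed', 'sagaal']
--
-- _teens = ['toban', 'kow iyo toban', 'labo iyo toban', 'saddex iyo toban', 'afar iyo toban', 'shan iyo toban', 'lix iyo toban', 'toddoba iyo toban', 'siddeed iyo toban', 'sagaal iyo toban']
--
-- _tens = ['', '', 'labaatan', 'soddon', 'afartan', 'konton', 'lixdan', 'toddobaatan', 'siddeetan', 'sagaashan']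
--
-- _scale = ['', 'boqol', 'kun', 'milyan', 'bilyan', 'tirilyan', 'kuwadirilyan', 'kuwintirilyan', 'sekstirilyan', 'septirilyan', 'oktirilyan', 'nonirilyan', 'desirilyan']
--
-- def _convert_three_digits(number):
--     if number < 10:
--         return _ones[number]
--     elif number < 20:
--         return _teens[number - 10]
--     elif number < 100:
--         tens, ones = divmod(number, 10)
--         if ones == 0:
--             return _tens[tens]
--         else:
--             return _tens[tens] + ' iyo ' + _ones[ones]
--     else:
--         hundreds, remainder = divmod(number, 100)
--         if remainder == 0:
--             return _ones[hundreds] + ' boqol'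
--         else:
--             return _ones[hundreds] + ' boqol ' + _convert_three_digits(remainder)
--
-- def convert(number):
--     if number == 0:
--         return 'sifir'
--     elif number < 0:
--         return 'ka yar ' + convert(-number)
--
--     parts = []
--     scale_index = 0
--     while number > 0:
--         if number % 1000 != 0:
--             part = _convert_three_digits(number % 1000)
--             if scale_index > 0:
--                 part += ' ' + _scale[scale_index]
--             parts.append(part)
--         number //= 1000
--         scale_index += 1
--
--     return ' iyo '.join(reversed(parts))
-- ===== SOURCE B (Python) =====
-- _ones = ['', 'kow', 'labo', 'saddex', 'afar', 'shan', 'lix', 'toddoba', 'siddeed', 'sagaal']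
-- _teens = ['toban', 'kow iyo toban', 'labo iyo toban', 'saddex iyo toban', 'afar iyo toban', 'shan iyo toban', 'lix iyo toban', 'toddoba iyo toban', 'siddeed iyo toban', 'sagaal iyo toban']
-- _tens = ['', '', 'labaatan', 'soddon', 'afartan', 'konton', 'lixdan', 'toddobaatan', 'siddeetan', 'sagaashan']
-- _scale = ['', 'boqol', 'kun', 'milyan', 'bilyan', 'tirilyan', 'kuwadirilyan', 'kuwintirilyan', 'sekstirilyan', 'septirilyan', 'oktirilyan', 'nonirilyan', 'desirilyan']
--
-- def _three(n):
--     h, r = divmod(n, 100)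
--     words = []
--     if h:
--         words.append(_ones[h] + ' boqol')
--     if 10 <= r < 20:
--         words.append(_teens[r - 10])
--     else:
--         t, o = divmod(r, 10)
--         if t and o:
--             words.append(_tens[t] + ' iyo ' + _ones[o])
--         elif t:
--             words.append(_tens[t])
--         elif o:
--             words.append(_ones[o])
--     return ' '.join(words)
--
-- def _go(n, idx):
--     if n == 0:
--         return ''
--     rest = _go(n // 1000, idx + 1)
--     chunk = n % 1000
--     if chunk == 0:
--         return rest
--     part = _three(chunk) + ((' ' + _scale[idx]) if idx > 0 else '')
--     return part if rest == '' else rest + ' iyo ' + part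
--
-- def convert(number):
--     if number == 0:
--         return 'sifir'
--     if number < 0:
--         return 'ka yar ' + convert(-number)
--     return _go(number, 0)
-- ===== Notes on version B (the rewrite author's own statement) =====
-- stated objective: alternative
-- what changed: B replaces A's collect-reverse-join while loop by a top-down recursion that assembles the result string most-significant group first (no parts list, no reversal, no join), and replaces A's recursive if-chain three-digit converter by a flat word-list builder joined by spaces.
import Mathlib
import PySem

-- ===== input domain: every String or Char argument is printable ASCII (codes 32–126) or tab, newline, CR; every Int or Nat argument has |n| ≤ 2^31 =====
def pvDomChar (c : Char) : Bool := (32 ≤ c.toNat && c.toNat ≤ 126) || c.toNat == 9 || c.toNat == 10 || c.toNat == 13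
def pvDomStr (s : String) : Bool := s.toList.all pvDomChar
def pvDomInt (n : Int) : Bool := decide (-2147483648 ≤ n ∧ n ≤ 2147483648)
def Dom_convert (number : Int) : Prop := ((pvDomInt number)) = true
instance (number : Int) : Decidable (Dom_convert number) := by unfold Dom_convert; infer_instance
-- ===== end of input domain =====

-- B replaces A's collect-reverse-join loop and recursive three-digit chain by a direct
-- top-down recursive assembly (most-significant group first, no list, no reversal) and a
-- flat word-list three-digit converter (objective: alternative decomposition, same cost).

-- module constants shared by both Pythons
def pvOnes : List String := ["", "kow", "labo", "saddex", "afar", "shan", "lix", "toddoba", "siddeed", "sagaal"]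
def pvTeens : List String := ["toban", "kow iyo toban", "labo iyo toban", "saddex iyo toban", "afar iyo toban", "shan iyo toban", "lix iyo toban", "toddoba iyo toban", "siddeed iyo toban", "sagaal iyo toban"]
def pvTens : List String := ["", "", "labaatan", "soddon", "afartan", "konton", "lixdan", "toddobaatan", "siddeetan", "sagaashan"]
def pvScale : List String := ["", "boqol", "kun", "milyan", "bilyan", "tirilyan", "kuwadirilyan", "kuwintirilyan", "sekstirilyan", "septirilyan", "oktirilyan", "nonirilyan", "desirilyan"]

-- ===== PORT A =====
-- _convert_three_digits; list indexing via pyGetD "" (every index reached from convert is in range)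
def convThree (number : Int) : String :=
  if _h1 : number < 10 then PySem.List.pyGetD pvOnes number ""
  else if number < 20 then PySem.List.pyGetD pvTeens (number - 10) ""
  else if number < 100 then
    let tens := PySem.Int.floordiv number 10
    let ones := PySem.Int.mod number 10
    if ones = 0 then PySem.List.pyGetD pvTens tens ""
    else PySem.List.pyGetD pvTens tens "" ++ " iyo " ++ PySem.List.pyGetD pvOnes ones ""
  else
    let hundreds := PySem.Int.floordiv number 100
    let remainder := PySem.Int.mod number 100
    if remainder = 0 then PySem.List.pyGetD pvOnes hundreds "" ++ " boqol"
    else PySem.List.pyGetD pvOnes hundreds "" ++ " boqol " ++ convThree remainder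
termination_by number.toNat
decreasing_by
  have h1 : PySem.Int.mod number 100 < 100 := PySem.Int.mod_lt number (by norm_num)
  have h2 : (0:Int) ≤ PySem.Int.mod number 100 := PySem.Int.mod_nonneg number (by norm_num)
  omega

-- the while loop of convert, with its parts accumulator
def convLoop (number : Int) (scaleIndex : Int) (parts : List String) : List String :=
  if _h : 0 < number then
    let parts' :=
      if PySem.Int.mod number 1000 ≠ 0 then
        let part := convThree (PySem.Int.mod number 1000)
        let part := if 0 < scaleIndex then part ++ " " ++ PySem.List.pyGetD pvScale scaleIndex "" else part
        parts ++ [part]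
      else parts
    convLoop (PySem.Int.floordiv number 1000) (scaleIndex + 1) parts'
  else parts
termination_by number.toNat
decreasing_by
  have h1 : PySem.Int.floordiv number 1000 < number :=
    (PySem.Int.floordiv_lt_iff_lt_mul (by norm_num)).mpr (by nlinarith)
  omega

def convert (number : Int) : String :=
  if number = 0 then "sifir"
  else if _h : number < 0 then "ka yar " ++ convert (-number)
  else PySem.Str.join " iyo " (convLoop number 0 []).reverse
termination_by (if number < 0 then 1 else 0)
decreasing_by simp_all; omega

-- ===== PORT B =====
-- _three: flat word-list assembly, joined by ' '
def convThreeAlt (n : Int) : String :=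
  let h := PySem.Int.floordiv n 100
  let r := PySem.Int.mod n 100
  let words : List String := if h ≠ 0 then [PySem.List.pyGetD pvOnes h "" ++ " boqol"] else []
  let words := words ++
    (if 10 ≤ r ∧ r < 20 then [PySem.List.pyGetD pvTeens (r - 10) ""]
     else
       let t := PySem.Int.floordiv r 10
       let o := PySem.Int.mod r 10
       if t ≠ 0 ∧ o ≠ 0 then [PySem.List.pyGetD pvTens t "" ++ " iyo " ++ PySem.List.pyGetD pvOnes o ""]
       else if t ≠ 0 then [PySem.List.pyGetD pvTens t ""]
       else if o ≠ 0 then [PySem.List.pyGetD pvOnes o ""]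
       else [])
  PySem.Str.join " " words

-- _go: top-down recursion, builds the final string directly ('if n ≤ 0' is the totality guard
-- for Python's 'if n == 0'; _go is only reached with n > 0)
def convGo (n : Int) (idx : Int) : String :=
  if _h : n ≤ 0 then ""
  else
    let rest := convGo (PySem.Int.floordiv n 1000) (idx + 1)
    let chunk := PySem.Int.mod n 1000
    if chunk = 0 then rest
    else
      let part := convThreeAlt chunk ++ (if 0 < idx then " " ++ PySem.List.pyGetD pvScale idx "" else "")
      if rest = "" then part else rest ++ " iyo " ++ part
termination_by n.toNat
decreasing_by
  have h1 : PySem.Int.floordiv n 1000 < n :=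
    (PySem.Int.floordiv_lt_iff_lt_mul (by norm_num)).mpr (by nlinarith)
  omega

def convert_alt (number : Int) : String :=
  if number = 0 then "sifir"
  else if _h : number < 0 then "ka yar " ++ convert_alt (-number)
  else convGo number 0
termination_by (if number < 0 then 1 else 0)
decreasing_by simp_all; omega

-- ===== PRECONDITION & SPEC =====
def Spec_convert (number : Int) (out : String) : Prop := out = convert_alt number
instance (number : Int) (out : String) : Decidable (Spec_convert number out) := by unfold Spec_convert; infer_instance

-- ===== CLAIM (what is proved, stated in full; the proofs are below) =====
def Claim_equal_convert : Prop := ∀ (number : Int), Dom_convert number → Spec_convert number (convert number)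

-- ===== LEMMAS AND PROOFS =====

-- join over the empty / singleton list, and its cons-cons unfolding
lemma pv_join_nil (sep : String) : PySem.Str.join sep ([] : List String) = "" := by
  simp [PySem.Str.join, PySem.Chars.join, List.intercalate]

lemma pv_join_one (sep a : String) : PySem.Str.join sep [a] = a := by
  simp [PySem.Str.join, PySem.Chars.join, List.intercalate]

lemma pv_join_cons (sep a b : String) (t : List String) :
    PySem.Str.join sep (a :: b :: t) = a ++ sep ++ PySem.Str.join sep (b :: t) := by
  refine String.toList_inj.mp ?_
  simp [PySem.Str.join, PySem.Chars.join, List.intercalate, String.toList_append]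

-- a string with a nonempty prefix is nonempty
lemma pv_append_ne (a b : String) (h : a ≠ "") : a ++ b ≠ "" := by
  intro hc
  have := congrArg String.toList hc
  simp [String.toList_append] at this
  exact h this.1

-- join of nonempty strings is nonempty
lemma pv_join_ne (x : String) (t : List String) (hx : x ≠ "") :
    PySem.Str.join " iyo " (x :: t) ≠ "" := by
  cases t with
  | nil => rw [pv_join_one]; exact hx
  | cons y t' => rw [pv_join_cons]; exact pv_append_ne _ _ (pv_append_ne _ _ hx)

-- join over a snoc
lemma pv_join_snoc (xs : List String) (p : String) :
    PySem.Str.join " iyo " (xs ++ [p]) =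
      if xs = [] then p else PySem.Str.join " iyo " xs ++ " iyo " ++ p := by
  induction xs with
  | nil => simp [pv_join_one]
  | cons x t ih =>
    cases t with
    | nil => simp [pv_join_cons, pv_join_one]
    | cons y t' =>
      have hne : (y :: t') ++ [p] ≠ ([] : List String) := by simp
      simp only [List.cons_append, pv_join_cons]
      rw [List.cons_append] at ih
      simp only [List.cons_ne_nil, reduceIte] at ih ⊢
      rw [ih]
      simp [String.append_assoc]

-- the second word group of convThreeAlt for a zero remainder
lemma pv_words_zero :
    (if (10:Int) ≤ 0 ∧ (0:Int) < 20 then [PySem.List.pyGetD pvTeens ((0:Int) - 10) ""]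
     else
       if PySem.Int.floordiv (0:Int) 10 ≠ 0 ∧ PySem.Int.mod (0:Int) 10 ≠ 0 then
         [PySem.List.pyGetD pvTens (PySem.Int.floordiv (0:Int) 10) "" ++ " iyo " ++
           PySem.List.pyGetD pvOnes (PySem.Int.mod (0:Int) 10) ""]
       else if PySem.Int.floordiv (0:Int) 10 ≠ 0 then
         [PySem.List.pyGetD pvTens (PySem.Int.floordiv (0:Int) 10) ""]
       else if PySem.Int.mod (0:Int) 10 ≠ 0 then [PySem.List.pyGetD pvOnes (PySem.Int.mod (0:Int) 10) ""]
       else []) = ([] : List String) := by decide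

-- the second word group of convThreeAlt equals A's _convert_three_digits on 1..99
lemma pv_words_small (r : Int) (h0 : 1 ≤ r) (h1 : r < 100) :
    (if 10 ≤ r ∧ r < 20 then [PySem.List.pyGetD pvTeens (r - 10) ""]
     else
       if PySem.Int.floordiv r 10 ≠ 0 ∧ PySem.Int.mod r 10 ≠ 0 then
         [PySem.List.pyGetD pvTens (PySem.Int.floordiv r 10) "" ++ " iyo " ++
           PySem.List.pyGetD pvOnes (PySem.Int.mod r 10) ""]
       else if PySem.Int.floordiv r 10 ≠ 0 then [PySem.List.pyGetD pvTens (PySem.Int.floordiv r 10) ""]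
       else if PySem.Int.mod r 10 ≠ 0 then [PySem.List.pyGetD pvOnes (PySem.Int.mod r 10) ""]
       else []) = [convThree r] := by
  have hd : PySem.Int.floordiv r 10 = r / 10 := PySem.Int.floordiv_eq_ediv_of_pos (by norm_num)
  have hm : PySem.Int.mod r 10 = r % 10 := PySem.Int.mod_eq_emod_of_pos (by norm_num)
  rw [convThree.eq_def]
  by_cases c1 : r < 10
  · -- 1..9: single ones word
    rw [dif_pos c1]
    have ht : r / 10 = 0 := by omega
    have ho : r % 10 = r := by omega
    simp only [hd, hm, ht, ho]
    simp only [if_neg (by omega : ¬ (10 ≤ r ∧ r < 20)), if_neg (by simp : ¬ ((0:Int) ≠ 0 ∧ r ≠ 0)),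
      if_neg (by simp : ¬ ((0:Int) ≠ 0)), if_pos (by omega : r ≠ 0)]
  · rw [dif_neg c1]
    by_cases c2 : r < 20
    · -- teens
      rw [if_pos c2, if_pos (by omega : 10 ≤ r ∧ r < 20)]
    · -- 20..99
      rw [if_neg c2, if_pos (by omega : r < 100)]
      rw [if_neg (by omega : ¬ (10 ≤ r ∧ r < 20))]
      simp only [hd, hm]
      have ht : r / 10 ≠ 0 := by omega
      by_cases ho : r % 10 = 0
      · rw [if_neg (by simp [ho] : ¬ (r / 10 ≠ 0 ∧ r % 10 ≠ 0)), if_pos ht, if_pos ho]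
      · rw [if_pos ⟨ht, ho⟩, if_neg ho]

-- the two three-digit converters agree on 0..999 (the only values reached: n % 1000)
lemma convThree_eq_alt (k : Int) (h0 : 0 ≤ k) (h1 : k < 1000) : convThree k = convThreeAlt k := by
  have hd : PySem.Int.floordiv k 100 = k / 100 := PySem.Int.floordiv_eq_ediv_of_pos (by norm_num)
  have hm : PySem.Int.mod k 100 = k % 100 := PySem.Int.mod_eq_emod_of_pos (by norm_num)
  unfold convThreeAlt
  simp only [hd, hm]
  by_cases ck : k < 100
  · -- high digit absent
    have hh : k / 100 = 0 := by omega
    have hr : k % 100 = k := by omega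
    simp only [hh, hr, if_neg (by simp : ¬ ((0:Int) ≠ 0)), List.nil_append]
    by_cases hk0 : k = 0
    · subst hk0
      rw [pv_words_zero, pv_join_nil, convThree.eq_def, dif_pos (by norm_num : (0:Int) < 10)]
      decide
    · rw [pv_words_small k (by omega) ck, pv_join_one]
  · -- k in 100..999
    have hh1 : 1 ≤ k / 100 := by omega
    have hh9 : k / 100 < 10 := by omega
    rw [if_pos (by omega : k / 100 ≠ 0)]
    rw [convThree.eq_def, dif_neg (by omega : ¬ k < 10), if_neg (by omega : ¬ k < 20),
      if_neg (by omega : ¬ k < 100)]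
    simp only [hd, hm]
    by_cases hr : k % 100 = 0
    · rw [if_pos hr, hr, pv_words_zero, List.append_nil, pv_join_one]
    · rw [if_neg hr, pv_words_small (k % 100) (by omega) (by omega)]
      rw [show ([PySem.List.pyGetD pvOnes (k / 100) "" ++ " boqol"] ++ [convThree (k % 100)] :
            List String) = [PySem.List.pyGetD pvOnes (k / 100) "" ++ " boqol", convThree (k % 100)]
          from rfl]
      rw [pv_join_cons, pv_join_one]
      rw [show (" boqol ":String) = " boqol" ++ " " from rfl, ← String.append_assoc]

-- a three-digit part of a nonzero chunk is a nonempty string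
lemma convThree_ne_empty (k : Int) (h0 : 0 < k) (h1 : k < 1000) : convThree k ≠ "" := by
  have hd : PySem.Int.floordiv k 100 = k / 100 := PySem.Int.floordiv_eq_ediv_of_pos (by norm_num)
  have hm : PySem.Int.mod k 100 = k % 100 := PySem.Int.mod_eq_emod_of_pos (by norm_num)
  have hd10 : PySem.Int.floordiv k 10 = k / 10 := PySem.Int.floordiv_eq_ediv_of_pos (by norm_num)
  have hm10 : PySem.Int.mod k 10 = k % 10 := PySem.Int.mod_eq_emod_of_pos (by norm_num)
  rw [convThree.eq_def]
  by_cases c1 : k < 10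
  · rw [dif_pos c1]
    interval_cases k <;> decide
  · rw [dif_neg c1]
    by_cases c2 : k < 20
    · rw [if_pos c2]
      interval_cases k <;> decide
    · rw [if_neg c2]
      by_cases c3 : k < 100
      · rw [if_pos c3]
        simp only [hd10, hm10]
        have htens : PySem.List.pyGetD pvTens (k / 10) "" ≠ "" := by
          have hb1 : 2 ≤ k / 10 := by omega
          have hb2 : k / 10 < 10 := by omega
          set t := k / 10 with ht
          clear_value t
          interval_cases t <;> decide
        by_cases ho : k % 10 = 0
        · rw [if_pos ho]; exact htens
        · rw [if_neg ho]; exact pv_append_ne _ _ (pv_append_ne _ _ htens)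
      · rw [if_neg c3]
        simp only [hd, hm]
        have hones : PySem.List.pyGetD pvOnes (k / 100) "" ≠ "" := by
          have hb1 : 1 ≤ k / 100 := by omega
          have hb2 : k / 100 < 10 := by omega
          set t := k / 100 with ht
          clear_value t
          interval_cases t <;> decide
        by_cases hr : k % 100 = 0
        · rw [if_pos hr]; exact pv_append_ne _ _ hones
        · rw [if_neg hr]; exact pv_append_ne _ _ (pv_append_ne _ _ hones)

-- one unfolding of A's loop with an empty accumulator factored out
lemma convLoop_append (m : Nat) : ∀ (n i : Int), n.toNat ≤ m → ∀ parts,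
    convLoop n i parts = parts ++ convLoop n i [] := by
  induction m with
  | zero =>
    intro n i hm parts
    have hn : ¬ 0 < n := by omega
    rw [convLoop.eq_def, dif_neg hn, convLoop.eq_def, dif_neg hn, List.append_nil]
  | succ m ih =>
    intro n i hm parts
    by_cases hp : 0 < n
    · have hlt : PySem.Int.floordiv n 1000 < n :=
        (PySem.Int.floordiv_lt_iff_lt_mul (by norm_num)).mpr (by nlinarith)
      have hb : (PySem.Int.floordiv n 1000).toNat ≤ m := by omega
      rw [convLoop.eq_def, dif_pos hp]
      conv_rhs => rw [convLoop.eq_def, dif_pos hp]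
      simp only []
      by_cases hc : PySem.Int.mod n 1000 ≠ 0
      · simp only [if_pos hc]
        conv_lhs => rw [ih _ _ hb]
        conv_rhs => rw [ih _ _ hb]
        simp [List.append_assoc]
      · simp only [if_neg hc]
        conv_lhs => rw [ih _ _ hb]
    · rw [convLoop.eq_def, dif_neg hp, convLoop.eq_def, dif_neg hp, List.append_nil]

-- one unfolded step of A's loop on an empty accumulator
lemma convLoop_step (n i : Int) (hp : 0 < n) :
    convLoop n i [] =
      (if PySem.Int.mod n 1000 ≠ 0 then
        [if 0 < i then convThree (PySem.Int.mod n 1000) ++ " " ++ PySem.List.pyGetD pvScale i ""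
         else convThree (PySem.Int.mod n 1000)]
       else []) ++ convLoop (PySem.Int.floordiv n 1000) (i + 1) [] := by
  rw [convLoop.eq_def, dif_pos hp]
  simp only []
  by_cases hc : PySem.Int.mod n 1000 ≠ 0
  · simp only [if_pos hc]
    exact convLoop_append (PySem.Int.floordiv n 1000).toNat _ _ le_rfl _
  · simp only [if_neg hc]
    simp

-- every part collected by A's loop is nonempty
lemma convLoop_parts_ne_empty (m : Nat) : ∀ (n i : Int), n.toNat ≤ m →
    ∀ p ∈ convLoop n i [], p ≠ "" := by
  induction m with
  | zero =>
    intro n i hm p hp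
    rw [convLoop.eq_def, dif_neg (by omega : ¬ 0 < n)] at hp
    simp at hp
  | succ m ih =>
    intro n i hm p hp
    by_cases hpos : 0 < n
    · have hlt : PySem.Int.floordiv n 1000 < n :=
        (PySem.Int.floordiv_lt_iff_lt_mul (by norm_num)).mpr (by nlinarith)
      have hb : (PySem.Int.floordiv n 1000).toNat ≤ m := by omega
      rw [convLoop_step n i hpos] at hp
      by_cases hc : PySem.Int.mod n 1000 ≠ 0
      · rw [if_pos hc] at hp
        simp only [List.cons_append, List.nil_append, List.mem_cons] at hp
        rcases hp with hp | hp
        · subst hp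
          have hth : convThree (PySem.Int.mod n 1000) ≠ "" :=
            convThree_ne_empty _ (by
                have := PySem.Int.mod_nonneg n (b := 1000) (by norm_num); omega)
              (PySem.Int.mod_lt n (by norm_num))
          by_cases hi : 0 < i
          · rw [if_pos hi]; exact pv_append_ne _ _ (pv_append_ne _ _ hth)
          · rw [if_neg hi]; exact hth
        · exact ih _ _ hb p hp
      · rw [if_neg hc] at hp
        rw [List.nil_append] at hp
        exact ih _ _ hb p hp
    · rw [convLoop.eq_def, dif_neg hpos] at hp
      simp at hp

-- the core equivalence: B's recursive assembly = join of A's reversed parts list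
lemma convGo_eq (m : Nat) : ∀ (n i : Int), n.toNat ≤ m →
    convGo n i = PySem.Str.join " iyo " (convLoop n i []).reverse := by
  induction m with
  | zero =>
    intro n i hm
    rw [convGo.eq_def, dif_pos (by omega : n ≤ 0),
      convLoop.eq_def, dif_neg (by omega : ¬ 0 < n)]
    simp [pv_join_nil]
  | succ m ih =>
    intro n i hm
    by_cases hpos : 0 < n
    · have hlt : PySem.Int.floordiv n 1000 < n :=
        (PySem.Int.floordiv_lt_iff_lt_mul (by norm_num)).mpr (by nlinarith)
      have hb : (PySem.Int.floordiv n 1000).toNat ≤ m := by omega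
      rw [convGo.eq_def, dif_neg (by omega : ¬ n ≤ 0)]
      rw [convLoop_step n i hpos]
      simp only []
      by_cases hc : PySem.Int.mod n 1000 ≠ 0
      · rw [if_neg (by simpa using hc), if_pos hc]
        simp only [List.reverse_append, List.reverse_cons, List.reverse_nil, List.nil_append]
        rw [pv_join_snoc, ih _ _ hb]
        have hchunk0 : 0 ≤ PySem.Int.mod n 1000 := PySem.Int.mod_nonneg n (by norm_num)
        have hchunk1 : PySem.Int.mod n 1000 < 1000 := PySem.Int.mod_lt n (by norm_num)
        have hth := convThree_eq_alt (PySem.Int.mod n 1000) hchunk0 hchunk1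
        by_cases hrev : (convLoop (PySem.Int.floordiv n 1000) (i + 1) []).reverse = []
        · rw [if_pos hrev, hrev, pv_join_nil, ← hth]
          by_cases hi : 0 < i
          · rw [if_pos hi, if_pos hi]
            simp [String.append_assoc]
          · rw [if_neg hi, if_neg hi]
            simp
        · rw [if_neg hrev]
          have hjoin_ne : PySem.Str.join " iyo "
              (convLoop (PySem.Int.floordiv n 1000) (i + 1) []).reverse ≠ "" := by
            rcases hx : (convLoop (PySem.Int.floordiv n 1000) (i + 1) []).reverse with _ | ⟨x, t⟩
            · exact absurd hx hrev
            · have hxmem : x ∈ convLoop (PySem.Int.floordiv n 1000) (i + 1) [] := by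
                have : x ∈ (convLoop (PySem.Int.floordiv n 1000) (i + 1) []).reverse := by
                  rw [hx]; simp
                simpa using this
              exact pv_join_ne x t (convLoop_parts_ne_empty m _ _ hb x hxmem)
          rw [if_neg hjoin_ne, ← hth]
          by_cases hi : 0 < i
          · rw [if_pos hi, if_pos hi]
            simp [String.append_assoc]
          · rw [if_neg hi, if_neg hi]; simp
      · rw [if_pos (by simpa using hc), if_neg hc]
        rw [List.nil_append]
        exact ih _ _ hb
    · rw [convGo.eq_def, dif_pos (by omega : n ≤ 0),
        convLoop.eq_def, dif_neg hpos]
      simp [pv_join_nil]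

-- ===== VERDICT (by name: the statement is the Claim_ definition above) =====
theorem convert_spec : Claim_equal_convert := by
  intro number _
  unfold Spec_convert
  have key : ∀ nn : Int, 0 < nn →
      PySem.Str.join " iyo " (convLoop nn 0 []).reverse = convGo nn 0 := by
    intro nn _
    exact (convGo_eq nn.toNat nn 0 le_rfl).symm
  rw [convert.eq_def, convert_alt.eq_def]
  by_cases h0 : number = 0
  · rw [if_pos h0, if_pos h0]
  · rw [if_neg h0, if_neg h0]
    by_cases hneg : number < 0
    · rw [dif_pos hneg, dif_pos hneg]
      rw [convert.eq_def, convert_alt.eq_def,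
        if_neg (by omega : ¬ -number = 0), if_neg (by omega : ¬ -number = 0),
        dif_neg (by omega : ¬ -number < 0), dif_neg (by omega : ¬ -number < 0)]
      rw [key (-number) (by omega)]
    · rw [dif_neg hneg, dif_neg hneg]
      exact key number (by omega)
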